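-- pv_equiv track=rewrite | github.com/debruijn/adventofcode | aoc_2023/aoc_22.py | is_conflict_with_settled
-- ===== SOURCE A (Python) =====
-- from itertools import product
--
-- def is_conflict_with_settled(settled, low_brick):
--     if len(settled) == 0:
--         return False
--     for el in product(range(low_brick[0][0], low_brick[1][0]+1), range(low_brick[0][1], low_brick[1][1]+1)):
--         el = el + (min(low_brick[0][2], low_brick[1][2]),)
--         for brick in settled:
--             if brick[0][0] <= el[0] <= brick[1][0] and brick[0][1] <= el[1] <= brick[1][1] and brick[0][2] <= el[2] <= brick[1][2]:
--                 return True
--     return False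
-- ===== SOURCE B (Python) =====
-- def is_conflict_with_settled(settled, low_brick):
--     z = min(low_brick[0][2], low_brick[1][2])
--     return any(
--         max(low_brick[0][0], b[0][0]) <= min(low_brick[1][0], b[1][0])
--         and max(low_brick[0][1], b[0][1]) <= min(low_brick[1][1], b[1][1])
--         and b[0][2] <= z <= b[1][2]
--         for b in settled
--     )
-- ===== Notes on version B (the rewrite author's own statement) =====
-- stated objective: alternative
-- what changed: Replaces the per-cell footprint enumeration (product of x/y ranges, each cell checked against every settled brick) with a single pass over settled testing integer interval overlap of footprint rectangles.
import Mathlib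
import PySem

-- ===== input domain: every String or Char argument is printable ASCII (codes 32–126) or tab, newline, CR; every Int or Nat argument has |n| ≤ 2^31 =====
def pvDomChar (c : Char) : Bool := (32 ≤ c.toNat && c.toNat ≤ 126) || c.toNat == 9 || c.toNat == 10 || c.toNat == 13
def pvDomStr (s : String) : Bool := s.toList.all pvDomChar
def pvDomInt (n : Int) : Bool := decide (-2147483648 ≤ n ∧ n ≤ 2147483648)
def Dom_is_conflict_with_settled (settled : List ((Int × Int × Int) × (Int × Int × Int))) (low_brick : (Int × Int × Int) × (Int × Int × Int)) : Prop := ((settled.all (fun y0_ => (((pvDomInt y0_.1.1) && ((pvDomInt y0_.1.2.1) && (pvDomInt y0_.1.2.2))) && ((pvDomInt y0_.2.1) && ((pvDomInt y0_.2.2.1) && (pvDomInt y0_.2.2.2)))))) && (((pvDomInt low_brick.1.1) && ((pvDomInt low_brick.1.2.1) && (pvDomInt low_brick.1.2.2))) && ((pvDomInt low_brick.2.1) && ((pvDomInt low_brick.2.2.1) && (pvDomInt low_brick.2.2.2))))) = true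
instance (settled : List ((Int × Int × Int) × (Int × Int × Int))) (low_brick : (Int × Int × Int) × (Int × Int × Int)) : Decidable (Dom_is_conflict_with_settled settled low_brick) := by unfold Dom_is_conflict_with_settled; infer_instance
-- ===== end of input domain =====

-- B replaces A's per-cell footprint enumeration by a single pass over settled testing integer interval overlap.

-- ===== PORT A =====
-- literal port of A: early-exit loop over the product of the x- and y-ranges of the
-- footprint (z = min of the two z-coordinates), scanning all of settled per cell;
-- the lazy 'for el in product(...)' with early 'return True' becomes two early-exit recursions
def pyACell (settled : List ((Int × Int × Int) × (Int × Int × Int))) (x y z : Int) : Bool :=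
  settled.any (fun brick =>
    decide (brick.1.1 ≤ x ∧ x ≤ brick.2.1) &&
    decide (brick.1.2.1 ≤ y ∧ y ≤ brick.2.2.1) &&
    decide (brick.1.2.2 ≤ z ∧ z ≤ brick.2.2.2))

-- the loop counters: Python's range(a, b+1) performs (b+1-a) iterations; the early
-- 'return True' is the 'true' short-circuit
def pyALoopY (settled : List ((Int × Int × Int) × (Int × Int × Int))) (low_brick : (Int × Int × Int) × (Int × Int × Int)) (x y : Int) : Nat → Bool
  | 0 => false
  | n + 1 =>
    if pyACell settled x y (min low_brick.1.2.2 low_brick.2.2.2) then true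
    else pyALoopY settled low_brick x (y + 1) n

def pyALoopX (settled : List ((Int × Int × Int) × (Int × Int × Int))) (low_brick : (Int × Int × Int) × (Int × Int × Int)) (x : Int) : Nat → Bool
  | 0 => false
  | n + 1 =>
    if pyALoopY settled low_brick x low_brick.1.2.1 (low_brick.2.2.1 + 1 - low_brick.1.2.1).toNat then true
    else pyALoopX settled low_brick (x + 1) n

def is_conflict_with_settled (settled : List ((Int × Int × Int) × (Int × Int × Int))) (low_brick : (Int × Int × Int) × (Int × Int × Int)) : Bool :=
  if settled.length = 0 then false
  else pyALoopX settled low_brick low_brick.1.1 (low_brick.2.1 + 1 - low_brick.1.1).toNat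

-- ===== PORT B =====
-- port of Source B: one pass over settled, rectangle/interval overlap arithmetic
def is_conflict_with_settled_alt (settled : List ((Int × Int × Int) × (Int × Int × Int))) (low_brick : (Int × Int × Int) × (Int × Int × Int)) : Bool :=
  let z := min low_brick.1.2.2 low_brick.2.2.2
  settled.any (fun b =>
    decide (max low_brick.1.1 b.1.1 ≤ min low_brick.2.1 b.2.1) &&
    decide (max low_brick.1.2.1 b.1.2.1 ≤ min low_brick.2.2.1 b.2.2.1) &&
    decide (b.1.2.2 ≤ z ∧ z ≤ b.2.2.2))

-- ===== PRECONDITION & SPEC =====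
def Spec_is_conflict_with_settled (settled : List ((Int × Int × Int) × (Int × Int × Int))) (low_brick : (Int × Int × Int) × (Int × Int × Int)) (out : Bool) : Prop := out = is_conflict_with_settled_alt settled low_brick
instance (settled : List ((Int × Int × Int) × (Int × Int × Int))) (low_brick : (Int × Int × Int) × (Int × Int × Int)) (out : Bool) : Decidable (Spec_is_conflict_with_settled settled low_brick out) := by unfold Spec_is_conflict_with_settled; infer_instance

-- ===== CLAIM (what is proved, stated in full; the proofs are below) =====
def Claim_equal_is_conflict_with_settled : Prop := ∀ (settled : List ((Int × Int × Int) × (Int × Int × Int))) (low_brick : (Int × Int × Int) × (Int × Int × Int)), Dom_is_conflict_with_settled settled low_brick → Spec_is_conflict_with_settled settled low_brick (is_conflict_with_settled settled low_brick)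

-- ===== LEMMAS AND PROOFS =====
theorem pyALoopY_eq (settled : List ((Int × Int × Int) × (Int × Int × Int))) (low_brick : (Int × Int × Int) × (Int × Int × Int)) (x : Int) (n : Nat) (y : Int) :
    pyALoopY settled low_brick x y n =
      ((List.range n).map (fun (k : Nat) => y + (k : Int))).any
        (fun y' => pyACell settled x y' (min low_brick.1.2.2 low_brick.2.2.2)) := by
  induction n generalizing y with
  | zero => simp [pyALoopY]
  | succ n ih =>
    rw [List.range_succ_eq_map]
    simp only [pyALoopY, List.map_cons, List.any_cons, List.map_map]
    cases hc : pyACell settled x y (min low_brick.1.2.2 low_brick.2.2.2) with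
    | true => simp [hc]
    | false =>
      simp only [ih (y + 1), hc, Bool.false_eq_true, if_false, Nat.cast_zero, add_zero,
        Bool.false_or]
      congr 1
      apply List.map_congr_left
      intro k _
      simp only [Function.comp_apply]
      push_cast
      ring

theorem pyALoopX_eq (settled : List ((Int × Int × Int) × (Int × Int × Int))) (low_brick : (Int × Int × Int) × (Int × Int × Int)) (n : Nat) (x : Int) :
    pyALoopX settled low_brick x n =
      ((List.range n).map (fun (k : Nat) => x + (k : Int))).any
        (fun x' => pyALoopY settled low_brick x' low_brick.1.2.1 (low_brick.2.2.1 + 1 - low_brick.1.2.1).toNat) := by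
  induction n generalizing x with
  | zero => simp [pyALoopX]
  | succ n ih =>
    rw [List.range_succ_eq_map]
    simp only [pyALoopX, List.map_cons, List.any_cons, List.map_map]
    cases hc : pyALoopY settled low_brick x low_brick.1.2.1 (low_brick.2.2.1 + 1 - low_brick.1.2.1).toNat with
    | true => simp [hc]
    | false =>
      simp only [ih (x + 1), hc, Bool.false_eq_true, if_false, Nat.cast_zero, add_zero,
        Bool.false_or]
      congr 1
      apply List.map_congr_left
      intro k _
      simp only [Function.comp_apply]
      push_cast
      ring

theorem mem_range_map_add {n : Nat} {a x : Int} :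
    x ∈ (List.range n).map (fun (k : Nat) => a + (k : Int)) ↔ a ≤ x ∧ x < a + n := by
  constructor
  · intro h
    obtain ⟨k, hk, rfl⟩ := List.mem_map.mp h
    have hkn := List.mem_range.mp hk
    omega
  · rintro ⟨h1, h2⟩
    exact List.mem_map.mpr ⟨(x - a).toNat, List.mem_range.mpr (by omega), by omega⟩

theorem is_conflict_eq (settled : List ((Int × Int × Int) × (Int × Int × Int))) (low_brick : (Int × Int × Int) × (Int × Int × Int)) :
    is_conflict_with_settled settled low_brick = is_conflict_with_settled_alt settled low_brick := by
  cases settled with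
  | nil => rfl
  | cons b0 rest =>
    simp only [is_conflict_with_settled, List.length_cons,
      if_neg (by omega : ¬ (rest.length + 1 = 0)), pyALoopX_eq, pyALoopY_eq,
      pyACell, is_conflict_with_settled_alt]
    rw [Bool.eq_iff_iff]
    simp only [List.any_eq_true, mem_range_map_add, Bool.and_eq_true, decide_eq_true_eq]
    constructor
    · rintro ⟨x, ⟨hx1, hx2⟩, y, ⟨hy1, hy2⟩, brick, hb, ⟨⟨h1, h2⟩, ⟨h3, h4⟩⟩, h5⟩
      exact ⟨brick, hb, ⟨by omega, by omega⟩, h5⟩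
    · rintro ⟨brick, hb, ⟨h1, h2⟩, h3⟩
      exact ⟨max low_brick.1.1 brick.1.1, ⟨by omega, by omega⟩,
             max low_brick.1.2.1 brick.1.2.1, ⟨by omega, by omega⟩,
             brick, hb, ⟨⟨by omega, by omega⟩, by omega, by omega⟩, h3⟩

-- ===== VERDICT (by name: the statement is the Claim_ definition above) =====
theorem is_conflict_with_settled_spec : Claim_equal_is_conflict_with_settled := by
  intro settled low_brick _
  unfold Spec_is_conflict_with_settled
  exact is_conflict_eq settled low_brick
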